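-- pv_equiv track=rewrite | github.com/CavidTagiye/password-strength-checker | password_strength_check.py | _longest_run_in_sequence
-- ===== SOURCE A (Python) =====
-- def _longest_run_in_sequence(s: str, seq: str) -> int:
--     longest = 0
--     current = 1
--     for i in range(1, len(s)):
--         prev = s[i-1]
--         cur = s[i]
--         if prev in seq and cur in seq:
--             if seq.find(cur) - seq.find(prev) == 1:
--                 current += 1
--                 longest = max(longest, current)
--             else:
--                 current = 1
--         else:
--             current = 1
--     return longest
-- ===== SOURCE B (Python) =====
-- from itertools import groupby
--
-- def _longest_run_in_sequence(s: str, seq: str) -> int: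
--     # table of adjacency links, then longest contiguous block of 1s via groupby
--     links = [
--         1 if (s[i-1] in seq and s[i] in seq
--               and seq.find(s[i]) - seq.find(s[i-1]) == 1) else 0
--         for i in range(1, len(s))
--     ]
--     best = max((len(list(g)) for k, g in groupby(links) if k == 1), default=0)
--     return best + 1 if best else 0
-- ===== Notes on version B (the rewrite author's own statement) =====
-- stated objective: alternative
-- what changed: A's single accumulator loop carrying (longest, current) is replaced by a two-phase decomposition: first materialize a 0/1 adjacency-link table over adjacent character pairs, then use itertools.groupby to take the longest contiguous block of 1s and return its length + 1 (0 when none).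
import Mathlib
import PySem

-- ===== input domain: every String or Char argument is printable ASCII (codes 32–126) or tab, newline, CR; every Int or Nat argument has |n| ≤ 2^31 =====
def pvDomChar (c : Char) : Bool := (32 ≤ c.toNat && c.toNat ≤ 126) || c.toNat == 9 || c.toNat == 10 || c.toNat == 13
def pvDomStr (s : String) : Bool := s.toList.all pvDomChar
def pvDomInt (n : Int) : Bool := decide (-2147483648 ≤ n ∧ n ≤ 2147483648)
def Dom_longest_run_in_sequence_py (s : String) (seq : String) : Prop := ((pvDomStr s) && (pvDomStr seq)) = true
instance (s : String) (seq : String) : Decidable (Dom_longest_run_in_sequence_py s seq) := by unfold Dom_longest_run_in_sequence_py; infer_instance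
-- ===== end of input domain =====

-- B replaces A's single (longest, current) accumulator loop by a two-phase decomposition:
-- a 0/1 adjacency-link table over adjacent pairs, then the longest contiguous block of 1s
-- via a groupby pass (objective: alternative decomposition, same cost).

-- ===== PORT A =====
-- literal port of A's loop: state (longest, current), for i in range(1, len(s));
-- the `| _, _ =>` match arm only makes the indexing total — indices 1 ≤ i < len(s) are always in range
def longest_run_in_sequence_py (s : String) (seq : String) : Int :=
  ((PySem.List.pyRange 1 (PySem.Str.len s) 1).foldl
    (fun (st : Int × Int) (i : Int) =>
      match PySem.Str.pyGet? s (i - 1), PySem.Str.pyGet? s i with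
      | some prev, some cur =>
        if PySem.Chars.isIn [prev] seq.toList && PySem.Chars.isIn [cur] seq.toList then
          if PySem.Chars.find seq.toList [cur] - PySem.Chars.find seq.toList [prev] = 1 then
            (max st.1 (st.2 + 1), st.2 + 1)
          else (st.1, 1)
        else (st.1, 1)
      | _, _ => (st.1, 1))
    (0, 1)).1

-- ===== PORT B =====
-- links[i-1] = 1 iff s[i-1], s[i] are consecutive in seq (first-occurrence find), else 0
def pyLink (s : String) (seq : String) (i : Int) : Int :=
  match PySem.Str.pyGet? s (i - 1) with
  | none => 0
  | some prev =>
    match PySem.Str.pyGet? s i with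
    | none => 0
    | some cur =>
      if PySem.Chars.isIn [prev] seq.toList && PySem.Chars.isIn [cur] seq.toList &&
         decide (PySem.Chars.find seq.toList [cur] - PySem.Chars.find seq.toList [prev] = 1)
      then 1 else 0

-- itertools.groupby over the links, kept as (key, group length) pairs
def pyGroupPush (x : Int) : List (Int × Int) → List (Int × Int)
  | (k, n) :: rest => if k = x then (k, n + 1) :: rest else (x, 1) :: (k, n) :: rest
  | [] => [(x, 1)]

def pyGroupBy : List Int → List (Int × Int)
  | [] => []
  | x :: t => pyGroupPush x (pyGroupBy t)

-- max((len(list(g)) for k, g in groupby(links) if k == 1), default=0)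
def pyMaxLen1 : List (Int × Int) → Int
  | [] => 0
  | (k, n) :: rest => if k = 1 then max n (pyMaxLen1 rest) else pyMaxLen1 rest

def longest_run_in_sequence_py_alt (s : String) (seq : String) : Int :=
  let links := (PySem.List.pyRange 1 (PySem.Str.len s) 1).map (pyLink s seq)
  let best := pyMaxLen1 (pyGroupBy links)
  if best ≠ 0 then best + 1 else 0

-- ===== PRECONDITION & SPEC =====
def Spec_longest_run_in_sequence_py (s : String) (seq : String) (out : Int) : Prop := out = longest_run_in_sequence_py_alt s seq
instance (s : String) (seq : String) (out : Int) : Decidable (Spec_longest_run_in_sequence_py s seq out) := by unfold Spec_longest_run_in_sequence_py; infer_instance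

-- ===== CLAIM (what is proved, stated in full; the proofs are below) =====
def Claim_equal_longest_run_in_sequence_py : Prop := ∀ (s : String) (seq : String), Dom_longest_run_in_sequence_py s seq → Spec_longest_run_in_sequence_py s seq (longest_run_in_sequence_py s seq)

-- ===== LEMMAS AND PROOFS =====

-- A's loop body, factored through the link value of the pair at index i
def pvStep (st : Int × Int) (x : Int) : Int × Int :=
  if x = 1 then (max st.1 (st.2 + 1), st.2 + 1) else (st.1, 1)

-- length of the initial run of 1s
def pvLead : List Int → Int
  | [] => 0
  | x :: t => if x = 1 then 1 + pvLead t else 0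

-- length of the longest run of 1s
def pvBest : List Int → Int
  | [] => 0
  | x :: t => if x = 1 then max (1 + pvLead t) (pvBest t) else pvBest t

-- value of A's loop from current = c onward (longest-part contribution)
def pvH : List Int → Int → Int
  | [], _ => 0
  | x :: t, c => if x = 1 then max (c + 1) (pvH t (c + 1)) else pvH t 1

theorem pvLead_nonneg (l : List Int) : 0 ≤ pvLead l := by
  induction l with
  | nil => simp [pvLead]
  | cons x t ih => simp only [pvLead]; split <;> omega

theorem pvBest_nonneg (l : List Int) : 0 ≤ pvBest l := by
  induction l with
  | nil => simp [pvBest]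
  | cons x t ih =>
    have := pvLead_nonneg t
    simp only [pvBest]; split <;> omega

theorem pvLead_le_pvBest (l : List Int) : pvLead l ≤ pvBest l := by
  induction l with
  | nil => simp [pvLead, pvBest]
  | cons x t ih =>
    have := pvBest_nonneg t
    simp only [pvLead, pvBest]; split <;> omega

theorem pvH_nonneg (l : List Int) : ∀ c, 0 ≤ pvH l c := by
  induction l with
  | nil => intro c; simp [pvH]
  | cons x t ih =>
    intro c
    have h1 := ih (c + 1)
    have h2 := ih 1
    simp only [pvH]; split <;> omega

theorem pvFoldl_step (l : List Int) : ∀ (b c : Int), 0 ≤ b →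
    (l.foldl pvStep (b, c)).1 = max b (pvH l c) := by
  induction l with
  | nil => intro b c hb; simp [pvH]; omega
  | cons x t ih =>
    intro b c hb
    rw [List.foldl_cons]
    by_cases hx : x = 1
    · rw [show pvStep (b, c) x = (max b (c + 1), c + 1) from by simp [pvStep, hx],
          show pvH (x :: t) c = max (c + 1) (pvH t (c + 1)) from by simp [pvH, hx],
          ih (max b (c + 1)) (c + 1) (by omega)]
      omega
    · rw [show pvStep (b, c) x = (b, 1) from by simp [pvStep, hx],
          show pvH (x :: t) c = pvH t 1 from by simp [pvH, hx],
          ih b 1 hb]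

theorem pvH_char (l : List Int) : ∀ c, 1 ≤ c →
    pvH l c = if pvLead l = 0 then (if pvBest l = 0 then 0 else pvBest l + 1)
              else max (c + pvLead l) (pvBest l + 1) := by
  induction l with
  | nil => intro c _; simp [pvH, pvLead, pvBest]
  | cons x t ih =>
    intro c hc
    have hln := pvLead_nonneg t
    have hbn := pvBest_nonneg t
    have hlb := pvLead_le_pvBest t
    by_cases hx : x = 1
    · rw [show pvH (x :: t) c = max (c + 1) (pvH t (c + 1)) from by simp [pvH, hx],
          show pvLead (x :: t) = 1 + pvLead t from by simp [pvLead, hx],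
          show pvBest (x :: t) = max (1 + pvLead t) (pvBest t) from by simp [pvBest, hx],
          ih (c + 1) (by omega)]
      split_ifs <;> omega
    · rw [show pvH (x :: t) c = pvH t 1 from by simp [pvH, hx],
          show pvLead (x :: t) = 0 from by simp [pvLead, hx],
          show pvBest (x :: t) = pvBest t from by simp [pvBest, hx],
          ih 1 (by omega)]
      split_ifs <;> omega

-- key of the first group, if it is a 1-group: its length; else 0
def pvLeadG : List (Int × Int) → Int
  | [] => 0
  | (k, n) :: _ => if k = 1 then n else 0

theorem pvGroupBy_char (l : List Int) :
    pvLeadG (pyGroupBy l) = pvLead l ∧ pyMaxLen1 (pyGroupBy l) = pvBest l := by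
  induction l with
  | nil => simp [pyGroupBy, pvLeadG, pyMaxLen1, pvLead, pvBest]
  | cons x t ih =>
    obtain ⟨ih1, ih2⟩ := ih
    rw [show pyGroupBy (x :: t) = pyGroupPush x (pyGroupBy t) from rfl]
    cases hg : pyGroupBy t with
    | nil =>
      rw [hg] at ih1 ih2
      simp only [pvLeadG, pyMaxLen1] at ih1 ih2
      by_cases hx : x = 1 <;>
        simp [pyGroupPush, pvLeadG, pyMaxLen1, pvLead, pvBest, hx, ← ih1, ← ih2]
    | cons p rest =>
      obtain ⟨k, n⟩ := p
      rw [hg] at ih1 ih2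
      by_cases hk : k = x
      · subst hk
        by_cases hx : k = 1
        · subst hx
          simp [pyGroupPush, pvLeadG, pyMaxLen1, pvLead, pvBest] at ih1 ih2 ⊢
          omega
        · simp [pyGroupPush, pvLeadG, pyMaxLen1, pvLead, pvBest, hx] at ih1 ih2 ⊢
          omega
      · by_cases hx : x = 1
        · by_cases hk1 : k = 1
          · exact absurd (hk1.trans hx.symm) hk
          · subst hx
            simp [pyGroupPush, hk, pvLeadG, pyMaxLen1, pvLead, pvBest, hk1] at ih1 ih2 ⊢
            omega
        · by_cases hk1 : k = 1
          · subst hk1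
            simp [pyGroupPush, hk, pvLeadG, pyMaxLen1, pvLead, pvBest, hx] at ih1 ih2 ⊢
            omega
          · simp [pyGroupPush, hk, pvLeadG, pyMaxLen1, pvLead, pvBest, hx, hk1] at ih1 ih2 ⊢
            omega

-- A's loop body equals pvStep applied to the link value
theorem pvStep_eq (s seq : String) (st : Int × Int) (i : Int) :
    (match PySem.Str.pyGet? s (i - 1), PySem.Str.pyGet? s i with
      | some prev, some cur =>
        if PySem.Chars.isIn [prev] seq.toList && PySem.Chars.isIn [cur] seq.toList then
          if PySem.Chars.find seq.toList [cur] - PySem.Chars.find seq.toList [prev] = 1 then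
            (max st.1 (st.2 + 1), st.2 + 1)
          else (st.1, 1)
        else (st.1, 1)
      | _, _ => (st.1, 1)) = pvStep st (pyLink s seq i) := by
  unfold pyLink pvStep
  cases PySem.Str.pyGet? s (i - 1) with
  | none => simp
  | some prev =>
    cases PySem.Str.pyGet? s i with
    | none => simp
    | some cur =>
      by_cases h1 : PySem.Chars.isIn [prev] seq.toList = true
      · by_cases h2 : PySem.Chars.isIn [cur] seq.toList = true
        · by_cases h3 : PySem.Chars.find seq.toList [cur] - PySem.Chars.find seq.toList [prev] = 1
          · simp [h1, h2, h3]
          · simp [h1, h2, h3]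
        · simp [h1, Bool.eq_false_iff.mpr h2]
      · simp [Bool.eq_false_iff.mpr h1]

-- ===== VERDICT (by name: the statement is the Claim_ definition above) =====
theorem longest_run_in_sequence_py_spec : Claim_equal_longest_run_in_sequence_py := by
  intro s seq _
  unfold Spec_longest_run_in_sequence_py
  simp only [longest_run_in_sequence_py, longest_run_in_sequence_py_alt]
  have hfun : (fun (st : Int × Int) (i : Int) =>
      match PySem.Str.pyGet? s (i - 1), PySem.Str.pyGet? s i with
      | some prev, some cur =>
        if PySem.Chars.isIn [prev] seq.toList && PySem.Chars.isIn [cur] seq.toList then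
          if PySem.Chars.find seq.toList [cur] - PySem.Chars.find seq.toList [prev] = 1 then
            (max st.1 (st.2 + 1), st.2 + 1)
          else (st.1, 1)
        else (st.1, 1)
      | _, _ => (st.1, 1)) = fun st i => pvStep st (pyLink s seq i) := by
    funext st i; exact pvStep_eq s seq st i
  rw [hfun, ← List.foldl_map]
  set links := (PySem.List.pyRange 1 (PySem.Str.len s) 1).map (pyLink s seq) with hl
  have h0 := pvFoldl_step links 0 1 (by omega)
  have h1 := pvH_char links 1 (by omega)
  have h2 := (pvGroupBy_char links).2
  have hbn := pvBest_nonneg links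
  have hln := pvLead_nonneg links
  have hlb := pvLead_le_pvBest links
  have hh := pvH_nonneg links 1
  rw [h0, h1, h2]
  split_ifs <;> omega
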